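-- pv_equiv track=rewrite | github.com/itsakphyo/itsakphyo-bot | app/services/rag_service.py | _analyze_query_type
-- ===== SOURCE A (Python) =====
-- def _analyze_query_type(message: str) -> str:
--     """Analyze the type of query to provide appropriate response style."""
--     msg_lower = message.lower().strip()
--
--     # Handle empty or very short messages
--     if not msg_lower or len(msg_lower) < 2:
--         return "help"
--
--     # Greeting queries
--     if any(greeting in msg_lower for greeting in ['hello', 'hi', 'hey', 'good morning', 'good afternoon', 'good evening']):
--         return "greeting"
--
--     # Thanks responses
--     if any(thanks in msg_lower for thanks in ['thanks', 'thank you', 'thx']):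
--         return "thanks"
--
--     # Short conversational responses
--     if msg_lower in ['ok', 'okay', 'yes', 'very good', 'great', 'wow', 'wow that many', 'nice', 'no', 'nope', 'nothing', 'nah']:
--         return "conversational"
--
--     # Humor/casual comments
--     if any(casual in msg_lower for casual in ['funny', 'haha', 'lol', 'cool']):
--         return "conversational"
--
--     # Vague queries that need clarification
--     if msg_lower in ['everything', 'tell me everything', 'what happened', 'what about']:
--         return "vague"
--
--     # Specific technical questions
--     elif any(tech in msg_lower for tech in ['skills', 'programming', 'languages', 'technology', 'technical', 'experience', 'projects', 'work', 'exp']):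
--         return "technical"
--
--     # Identity questions
--     elif any(identity in msg_lower for identity in ['who is', 'tell me about', 'what does', 'about him', 'about aung']):
--         return "identity"
--
--     # Professional inquiries
--     elif any(prof in msg_lower for prof in ['hire', 'hiring', 'contact', 'reach', 'professional', 'work with', 'email', 'phone']):
--         return "professional"
--
--     # Help requests
--     elif 'help' in msg_lower:
--         return "help"
--
--     # Random/nonsense input
--     elif not any(char.isalpha() for char in msg_lower) or len(set(msg_lower.replace(' ', ''))) <= 3:
--         return "nonsense"
--
--     # Default conversational
--     else:
--         return "conversational"
-- ===== SOURCE B (Python) =====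
-- # B: flatten the priority chain: collect ALL matching categories with their
-- # priorities in one pass over a keyword table, then return the label of the
-- # minimum priority (no hit -> nonsense/default stage).
--
-- _SUB_GROUPS = [
--     (1, ['hello', 'hi', 'hey', 'good morning', 'good afternoon', 'good evening']),
--     (2, ['thanks', 'thank you', 'thx']),
--     (4, ['funny', 'haha', 'lol', 'cool']),
--     (6, ['skills', 'programming', 'languages', 'technology', 'technical',
--          'experience', 'projects', 'work', 'exp']),
--     (7, ['who is', 'tell me about', 'what does', 'about him', 'about aung']),
--     (8, ['hire', 'hiring', 'contact', 'reach', 'professional', 'work with',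
--          'email', 'phone']),
--     (9, ['help']),
-- ]
--
-- _EXACT = {p: 3 for p in ['ok', 'okay', 'yes', 'very good', 'great', 'wow',
--                          'wow that many', 'nice', 'no', 'nope', 'nothing', 'nah']}
-- _EXACT.update({p: 5 for p in ['everything', 'tell me everything',
--                               'what happened', 'what about']})
--
-- _LABEL = {1: "greeting", 2: "thanks", 3: "conversational", 4: "conversational",
--           5: "vague", 6: "technical", 7: "identity", 8: "professional", 9: "help"}
--
--
-- def _analyze_query_type(message: str) -> str:
--     m = message.lower().strip()
--     if not m or len(m) < 2:
--         return "help"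
--     hits = [prio for prio, kws in _SUB_GROUPS if any(k in m for k in kws)]
--     if m in _EXACT:
--         hits.append(_EXACT[m])
--     if hits:
--         return _LABEL[min(hits)]
--     if not any(c.isalpha() for c in m) or len(set(m.replace(' ', ''))) <= 3:
--         return "nonsense"
--     return "conversational"
-- ===== Notes on version B (the rewrite author's own statement) =====
-- stated objective: alternative
-- what changed: Instead of A's first-match if/elif chain, B collects ALL matching categories as priorities in one pass over a flat keyword-group table plus an exact-phrase dictionary, then returns the label of the minimum priority (correct because the chain's answer is exactly the lowest-priority matching rule).
import Mathlib
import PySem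

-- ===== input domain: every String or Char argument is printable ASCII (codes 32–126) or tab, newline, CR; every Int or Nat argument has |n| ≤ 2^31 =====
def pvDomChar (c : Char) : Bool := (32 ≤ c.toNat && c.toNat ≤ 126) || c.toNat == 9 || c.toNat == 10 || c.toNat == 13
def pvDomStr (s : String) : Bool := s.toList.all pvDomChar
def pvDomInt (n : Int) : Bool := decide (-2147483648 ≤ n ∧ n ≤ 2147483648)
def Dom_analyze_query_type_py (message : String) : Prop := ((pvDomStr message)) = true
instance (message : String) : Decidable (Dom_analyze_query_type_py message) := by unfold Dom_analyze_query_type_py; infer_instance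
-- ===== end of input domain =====

-- B replaces A's first-match if/elif chain by a different strategy: it collects ALL matching
-- categories (as priorities) from a flat keyword table plus an exact-phrase dictionary in one
-- pass, then returns the label of the MINIMUM priority (alternative algorithm, same cost).

-- ===== PORT A =====
-- literal transliteration of A's if/elif chain
def analyze_query_type_py (message : String) : String :=
  let m := PySem.Str.strip (PySem.Str.lower message)
  if m == "" || decide (PySem.Str.len m < 2) then "help"
  else if ["hello", "hi", "hey", "good morning", "good afternoon", "good evening"].any (fun k => PySem.Str.isIn k m) then "greeting"
  else if ["thanks", "thank you", "thx"].any (fun k => PySem.Str.isIn k m) then "thanks"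
  else if ["ok", "okay", "yes", "very good", "great", "wow", "wow that many", "nice", "no", "nope", "nothing", "nah"].contains m then "conversational"
  else if ["funny", "haha", "lol", "cool"].any (fun k => PySem.Str.isIn k m) then "conversational"
  else if ["everything", "tell me everything", "what happened", "what about"].contains m then "vague"
  else if ["skills", "programming", "languages", "technology", "technical", "experience", "projects", "work", "exp"].any (fun k => PySem.Str.isIn k m) then "technical"
  else if ["who is", "tell me about", "what does", "about him", "about aung"].any (fun k => PySem.Str.isIn k m) then "identity"
  else if ["hire", "hiring", "contact", "reach", "professional", "work with", "email", "phone"].any (fun k => PySem.Str.isIn k m) then "professional"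
  else if PySem.Str.isIn "help" m then "help"
  else if (!(m.toList.any PySem.Chars.isalpha)) || decide ((PySem.Set.ofList (PySem.Str.replace m " " "").toList).length ≤ 3) then "nonsense"
  else "conversational"

-- ===== PORT B =====
-- B-side tables: substring-keyword groups with priorities, the exact-phrase dict, the label dict
def pvSubGroups : List (Int × List String) :=
  [ (1, ["hello", "hi", "hey", "good morning", "good afternoon", "good evening"]),
    (2, ["thanks", "thank you", "thx"]),
    (4, ["funny", "haha", "lol", "cool"]),
    (6, ["skills", "programming", "languages", "technology", "technical", "experience", "projects", "work", "exp"]),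
    (7, ["who is", "tell me about", "what does", "about him", "about aung"]),
    (8, ["hire", "hiring", "contact", "reach", "professional", "work with", "email", "phone"]),
    (9, ["help"]) ]
def pvExact : PySem.Dict String Int :=
  PySem.Dict.mk [("ok", 3), ("okay", 3), ("yes", 3), ("very good", 3), ("great", 3), ("wow", 3),
                 ("wow that many", 3), ("nice", 3), ("no", 3), ("nope", 3), ("nothing", 3), ("nah", 3),
                 ("everything", 5), ("tell me everything", 5), ("what happened", 5), ("what about", 5)]
def pvLabel : PySem.Dict Int String :=
  PySem.Dict.mk [(1, "greeting"), (2, "thanks"), (3, "conversational"), (4, "conversational"),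
                 (5, "vague"), (6, "technical"), (7, "identity"), (8, "professional"), (9, "help")]
-- hits = [prio for prio, kws in _SUB_GROUPS if any(k in m for k in kws)]  (+ exact-dict hit)
def pvHits (m : String) : List Int :=
  let hits0 := (pvSubGroups.filter (fun g => g.2.any (fun k => PySem.Str.isIn k m))).map (fun g => g.1)
  match pvExact.get? m with
  | some p => hits0 ++ [p]
  | none => hits0
-- everything after the short-message guard: min-priority label, else nonsense/default
def pvStage2 (m : String) : String :=
  if !(pvHits m).isEmpty then
    match PySem.List.min? (pvHits m) (fun p => p) with
    | some p => (pvLabel.get? p).getD ""   -- the key is always present; the default is unreachable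
    | none => ""                           -- unreachable: the list is nonempty here
  else if (!(m.toList.any PySem.Chars.isalpha)) || decide ((PySem.Set.ofList (PySem.Str.replace m " " "").toList).length ≤ 3) then "nonsense"
  else "conversational"
def analyze_query_type_py_alt (message : String) : String :=
  let m := PySem.Str.strip (PySem.Str.lower message)
  if m == "" || decide (PySem.Str.len m < 2) then "help"
  else pvStage2 m

-- ===== PRECONDITION & SPEC =====
def Spec_analyze_query_type_py (message : String) (out : String) : Prop := out = analyze_query_type_py_alt message
instance (message : String) (out : String) : Decidable (Spec_analyze_query_type_py message out) := by unfold Spec_analyze_query_type_py; infer_instance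

-- ===== CLAIM (what is proved, stated in full; the proofs are below) =====
def Claim_equal_analyze_query_type_py : Prop := ∀ (message : String), Dom_analyze_query_type_py message → Spec_analyze_query_type_py message (analyze_query_type_py message)

-- ===== LEMMAS AND PROOFS =====

set_option maxHeartbeats 1000000 in
theorem mem_pvHits (m : String) (y : Int) :
    y ∈ pvHits m ↔
      ((["hello", "hi", "hey", "good morning", "good afternoon", "good evening"].any (fun k => PySem.Str.isIn k m)) = true ∧ y = 1) ∨
      ((["thanks", "thank you", "thx"].any (fun k => PySem.Str.isIn k m)) = true ∧ y = 2) ∨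
      ((["funny", "haha", "lol", "cool"].any (fun k => PySem.Str.isIn k m)) = true ∧ y = 4) ∨
      ((["skills", "programming", "languages", "technology", "technical", "experience", "projects", "work", "exp"].any (fun k => PySem.Str.isIn k m)) = true ∧ y = 6) ∨
      ((["who is", "tell me about", "what does", "about him", "about aung"].any (fun k => PySem.Str.isIn k m)) = true ∧ y = 7) ∨
      ((["hire", "hiring", "contact", "reach", "professional", "work with", "email", "phone"].any (fun k => PySem.Str.isIn k m)) = true ∧ y = 8) ∨
      ((PySem.Str.isIn "help" m) = true ∧ y = 9) ∨
      pvExact.get? m = some y := by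
  cases h : pvExact.get? m with
  | none =>
    simp only [pvHits, pvSubGroups, h, List.mem_map, List.mem_filter, List.mem_cons,
      List.not_mem_nil, or_false]
    constructor
    · rintro ⟨g, ⟨hg, hp⟩, hy⟩
      rcases hg with rfl|rfl|rfl|rfl|rfl|rfl|rfl <;> simp_all
    · rintro (⟨hc, rfl⟩|⟨hc, rfl⟩|⟨hc, rfl⟩|⟨hc, rfl⟩|⟨hc, rfl⟩|⟨hc, rfl⟩|⟨hc, rfl⟩|hfalse)
      · exact ⟨_, ⟨Or.inl rfl, hc⟩, rfl⟩
      · exact ⟨_, ⟨Or.inr (Or.inl rfl), hc⟩, rfl⟩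
      · exact ⟨_, ⟨Or.inr (Or.inr (Or.inl rfl)), hc⟩, rfl⟩
      · exact ⟨_, ⟨Or.inr (Or.inr (Or.inr (Or.inl rfl))), hc⟩, rfl⟩
      · exact ⟨_, ⟨Or.inr (Or.inr (Or.inr (Or.inr (Or.inl rfl)))), hc⟩, rfl⟩
      · exact ⟨_, ⟨Or.inr (Or.inr (Or.inr (Or.inr (Or.inr (Or.inl rfl))))), hc⟩, rfl⟩
      · refine ⟨_, ⟨Or.inr (Or.inr (Or.inr (Or.inr (Or.inr (Or.inr rfl))))), ?_⟩, rfl⟩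
        simpa using hc
      · exact absurd hfalse (by simp)
  | some p =>
    simp only [pvHits, pvSubGroups, h, List.mem_append, List.mem_map, List.mem_filter,
      List.mem_cons, List.not_mem_nil, or_false, Option.some.injEq]
    constructor
    · rintro (⟨g, ⟨hg, hp⟩, hy⟩|rfl)
      · rcases hg with rfl|rfl|rfl|rfl|rfl|rfl|rfl <;> simp_all
      · tauto
    · rintro (⟨hc, rfl⟩|⟨hc, rfl⟩|⟨hc, rfl⟩|⟨hc, rfl⟩|⟨hc, rfl⟩|⟨hc, rfl⟩|⟨hc, rfl⟩|rfl)
      · exact Or.inl ⟨_, ⟨Or.inl rfl, hc⟩, rfl⟩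
      · exact Or.inl ⟨_, ⟨Or.inr (Or.inl rfl), hc⟩, rfl⟩
      · exact Or.inl ⟨_, ⟨Or.inr (Or.inr (Or.inl rfl)), hc⟩, rfl⟩
      · exact Or.inl ⟨_, ⟨Or.inr (Or.inr (Or.inr (Or.inl rfl))), hc⟩, rfl⟩
      · exact Or.inl ⟨_, ⟨Or.inr (Or.inr (Or.inr (Or.inr (Or.inl rfl)))), hc⟩, rfl⟩
      · exact Or.inl ⟨_, ⟨Or.inr (Or.inr (Or.inr (Or.inr (Or.inr (Or.inl rfl))))), hc⟩, rfl⟩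
      · refine Or.inl ⟨_, ⟨Or.inr (Or.inr (Or.inr (Or.inr (Or.inr (Or.inr rfl))))), ?_⟩, rfl⟩
        simpa using hc
      · exact Or.inr rfl
theorem pv_min_eq {l : List Int} {x : Int} (hx : x ∈ l) (hall : ∀ y ∈ l, x ≤ y) :
    PySem.List.min? l (fun p => p) = some x := by
  cases h : PySem.List.min? l (fun p => p) with
  | none =>
    rw [PySem.List.min?_eq_none_iff] at h
    subst h; cases hx
  | some q =>
    have hq := PySem.List.min?_mem h
    have h1 := PySem.List.min?_isMin h x hx
    have h2 := hall q hq
    rw [le_antisymm h1 h2]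

theorem pvExact_conv (m : String)
    (h : (["ok", "okay", "yes", "very good", "great", "wow", "wow that many", "nice", "no", "nope", "nothing", "nah"].contains m) = true) :
    pvExact.get? m = some 3 := by
  have hm : m ∈ ["ok", "okay", "yes", "very good", "great", "wow", "wow that many", "nice", "no", "nope", "nothing", "nah"] := by
    simpa using h
  fin_cases hm <;> decide

theorem pvExact_vague (m : String)
    (h : (["everything", "tell me everything", "what happened", "what about"].contains m) = true) :
    pvExact.get? m = some 5 := by
  have hm : m ∈ ["everything", "tell me everything", "what happened", "what about"] := by simpa using h
  fin_cases hm <;> decide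

theorem pvExact_cases (m : String) (y : Int) (h : pvExact.get? m = some y) :
    (y = 3 ∧ (["ok", "okay", "yes", "very good", "great", "wow", "wow that many", "nice", "no", "nope", "nothing", "nah"].contains m) = true) ∨
    (y = 5 ∧ (["everything", "tell me everything", "what happened", "what about"].contains m) = true) := by
  by_cases hc : m ∈ ["ok", "okay", "yes", "very good", "great", "wow", "wow that many", "nice", "no", "nope", "nothing", "nah"]
  · left
    refine ⟨?_, by simpa using hc⟩
    have h3 := pvExact_conv m (by simpa using hc)
    rw [h3] at h
    exact (Option.some_inj.1 h).symm
  · by_cases hv : m ∈ ["everything", "tell me everything", "what happened", "what about"]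
    · right
      refine ⟨?_, by simpa using hv⟩
      have h5 := pvExact_vague m (by simpa using hv)
      rw [h5] at h
      exact (Option.some_inj.1 h).symm
    · exfalso
      have hnone : pvExact.get? m = none := by
        simp only [List.mem_cons, List.not_mem_nil, or_false] at hc hv
        push Not at hc hv
        obtain ⟨c1, c2, c3, c4, c5, c6, c7, c8, c9, c10, c11, c12⟩ := hc
        obtain ⟨v1, v2, v3, v4⟩ := hv
        simp [pvExact, PySem.Dict.get?,
              Ne.symm c1, Ne.symm c2, Ne.symm c3, Ne.symm c4, Ne.symm c5, Ne.symm c6,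
              Ne.symm c7, Ne.symm c8, Ne.symm c9, Ne.symm c10, Ne.symm c11, Ne.symm c12,
              Ne.symm v1, Ne.symm v2, Ne.symm v3, Ne.symm v4]
      rw [hnone] at h; cases h

theorem pv_hit (m : String) (x : Int) (lab : String)
    (hx : x ∈ pvHits m) (hall : ∀ y ∈ pvHits m, x ≤ y)
    (hlab : (pvLabel.get? x).getD "" = lab) :
    pvStage2 m = lab := by
  unfold pvStage2
  rw [if_pos (by simp; exact List.ne_nil_of_mem hx)]
  rw [pv_min_eq hx hall]
  exact hlab

theorem pv_stage2_empty (m : String) (h : pvHits m = []) :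
    pvStage2 m =
      (if (!(m.toList.any PySem.Chars.isalpha)) || decide ((PySem.Set.ofList (PySem.Str.replace m " " "").toList).length ≤ 3) then "nonsense"
       else "conversational") := by
  unfold pvStage2
  rw [h]
  rfl

set_option maxHeartbeats 1600000 in
theorem pv_body_eq (m : String) :
    (if ["hello", "hi", "hey", "good morning", "good afternoon", "good evening"].any (fun k => PySem.Str.isIn k m) then "greeting"
     else if ["thanks", "thank you", "thx"].any (fun k => PySem.Str.isIn k m) then "thanks"
     else if ["ok", "okay", "yes", "very good", "great", "wow", "wow that many", "nice", "no", "nope", "nothing", "nah"].contains m then "conversational"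
     else if ["funny", "haha", "lol", "cool"].any (fun k => PySem.Str.isIn k m) then "conversational"
     else if ["everything", "tell me everything", "what happened", "what about"].contains m then "vague"
     else if ["skills", "programming", "languages", "technology", "technical", "experience", "projects", "work", "exp"].any (fun k => PySem.Str.isIn k m) then "technical"
     else if ["who is", "tell me about", "what does", "about him", "about aung"].any (fun k => PySem.Str.isIn k m) then "identity"
     else if ["hire", "hiring", "contact", "reach", "professional", "work with", "email", "phone"].any (fun k => PySem.Str.isIn k m) then "professional"
     else if PySem.Str.isIn "help" m then "help"
     else if (!(m.toList.any PySem.Chars.isalpha)) || decide ((PySem.Set.ofList (PySem.Str.replace m " " "").toList).length ≤ 3) then "nonsense"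
     else "conversational") = pvStage2 m := by
  by_cases h1 : (["hello", "hi", "hey", "good morning", "good afternoon", "good evening"].any (fun k => PySem.Str.isIn k m)) = true
  · rw [if_pos h1, pv_hit m 1 "greeting" ((mem_pvHits m 1).2 (Or.inl ⟨h1, rfl⟩)) ?_ (by rfl)]
    intro y hy
    rcases (mem_pvHits m y).1 hy with ⟨hc, rfl⟩|⟨hc, rfl⟩|⟨hc, rfl⟩|⟨hc, rfl⟩|⟨hc, rfl⟩|⟨hc, rfl⟩|⟨hc, rfl⟩|hE
    · norm_num
    · norm_num
    · norm_num
    · norm_num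
    · norm_num
    · norm_num
    · norm_num
    · rcases pvExact_cases m y hE with ⟨rfl, hc⟩|⟨rfl, hc⟩
      · norm_num
      · norm_num
  · rw [if_neg h1]
    by_cases h2 : (["thanks", "thank you", "thx"].any (fun k => PySem.Str.isIn k m)) = true
    · rw [if_pos h2, pv_hit m 2 "thanks" ((mem_pvHits m 2).2 (Or.inr (Or.inl ⟨h2, rfl⟩))) ?_ (by rfl)]
      intro y hy
      rcases (mem_pvHits m y).1 hy with ⟨hc, rfl⟩|⟨hc, rfl⟩|⟨hc, rfl⟩|⟨hc, rfl⟩|⟨hc, rfl⟩|⟨hc, rfl⟩|⟨hc, rfl⟩|hE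
      · exact absurd hc h1
      · norm_num
      · norm_num
      · norm_num
      · norm_num
      · norm_num
      · norm_num
      · rcases pvExact_cases m y hE with ⟨rfl, hc⟩|⟨rfl, hc⟩
        · norm_num
        · norm_num
    · rw [if_neg h2]
      by_cases h3 : (["ok", "okay", "yes", "very good", "great", "wow", "wow that many", "nice", "no", "nope", "nothing", "nah"].contains m) = true
      · rw [if_pos h3, pv_hit m 3 "conversational" ((mem_pvHits m 3).2 (Or.inr (Or.inr (Or.inr (Or.inr (Or.inr (Or.inr (Or.inr (pvExact_conv m h3))))))))) ?_ (by rfl)]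
        intro y hy
        rcases (mem_pvHits m y).1 hy with ⟨hc, rfl⟩|⟨hc, rfl⟩|⟨hc, rfl⟩|⟨hc, rfl⟩|⟨hc, rfl⟩|⟨hc, rfl⟩|⟨hc, rfl⟩|hE
        · exact absurd hc h1
        · exact absurd hc h2
        · norm_num
        · norm_num
        · norm_num
        · norm_num
        · norm_num
        · rcases pvExact_cases m y hE with ⟨rfl, hc⟩|⟨rfl, hc⟩
          · norm_num
          · norm_num
      · rw [if_neg h3]
        by_cases h4 : (["funny", "haha", "lol", "cool"].any (fun k => PySem.Str.isIn k m)) = true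
        · rw [if_pos h4, pv_hit m 4 "conversational" ((mem_pvHits m 4).2 (Or.inr (Or.inr (Or.inl ⟨h4, rfl⟩)))) ?_ (by rfl)]
          intro y hy
          rcases (mem_pvHits m y).1 hy with ⟨hc, rfl⟩|⟨hc, rfl⟩|⟨hc, rfl⟩|⟨hc, rfl⟩|⟨hc, rfl⟩|⟨hc, rfl⟩|⟨hc, rfl⟩|hE
          · exact absurd hc h1
          · exact absurd hc h2
          · norm_num
          · norm_num
          · norm_num
          · norm_num
          · norm_num
          · rcases pvExact_cases m y hE with ⟨rfl, hc⟩|⟨rfl, hc⟩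
            · exact absurd hc h3
            · norm_num
        · rw [if_neg h4]
          by_cases h5 : (["everything", "tell me everything", "what happened", "what about"].contains m) = true
          · rw [if_pos h5, pv_hit m 5 "vague" ((mem_pvHits m 5).2 (Or.inr (Or.inr (Or.inr (Or.inr (Or.inr (Or.inr (Or.inr (pvExact_vague m h5))))))))) ?_ (by rfl)]
            intro y hy
            rcases (mem_pvHits m y).1 hy with ⟨hc, rfl⟩|⟨hc, rfl⟩|⟨hc, rfl⟩|⟨hc, rfl⟩|⟨hc, rfl⟩|⟨hc, rfl⟩|⟨hc, rfl⟩|hE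
            · exact absurd hc h1
            · exact absurd hc h2
            · exact absurd hc h4
            · norm_num
            · norm_num
            · norm_num
            · norm_num
            · rcases pvExact_cases m y hE with ⟨rfl, hc⟩|⟨rfl, hc⟩
              · exact absurd hc h3
              · norm_num
          · rw [if_neg h5]
            by_cases h6 : (["skills", "programming", "languages", "technology", "technical", "experience", "projects", "work", "exp"].any (fun k => PySem.Str.isIn k m)) = true
            · rw [if_pos h6, pv_hit m 6 "technical" ((mem_pvHits m 6).2 (Or.inr (Or.inr (Or.inr (Or.inl ⟨h6, rfl⟩))))) ?_ (by rfl)]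
              intro y hy
              rcases (mem_pvHits m y).1 hy with ⟨hc, rfl⟩|⟨hc, rfl⟩|⟨hc, rfl⟩|⟨hc, rfl⟩|⟨hc, rfl⟩|⟨hc, rfl⟩|⟨hc, rfl⟩|hE
              · exact absurd hc h1
              · exact absurd hc h2
              · exact absurd hc h4
              · norm_num
              · norm_num
              · norm_num
              · norm_num
              · rcases pvExact_cases m y hE with ⟨rfl, hc⟩|⟨rfl, hc⟩
                · exact absurd hc h3
                · exact absurd hc h5
            · rw [if_neg h6]
              by_cases h7 : (["who is", "tell me about", "what does", "about him", "about aung"].any (fun k => PySem.Str.isIn k m)) = true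
              · rw [if_pos h7, pv_hit m 7 "identity" ((mem_pvHits m 7).2 (Or.inr (Or.inr (Or.inr (Or.inr (Or.inl ⟨h7, rfl⟩)))))) ?_ (by rfl)]
                intro y hy
                rcases (mem_pvHits m y).1 hy with ⟨hc, rfl⟩|⟨hc, rfl⟩|⟨hc, rfl⟩|⟨hc, rfl⟩|⟨hc, rfl⟩|⟨hc, rfl⟩|⟨hc, rfl⟩|hE
                · exact absurd hc h1
                · exact absurd hc h2
                · exact absurd hc h4
                · exact absurd hc h6
                · norm_num
                · norm_num
                · norm_num
                · rcases pvExact_cases m y hE with ⟨rfl, hc⟩|⟨rfl, hc⟩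
                  · exact absurd hc h3
                  · exact absurd hc h5
              · rw [if_neg h7]
                by_cases h8 : (["hire", "hiring", "contact", "reach", "professional", "work with", "email", "phone"].any (fun k => PySem.Str.isIn k m)) = true
                · rw [if_pos h8, pv_hit m 8 "professional" ((mem_pvHits m 8).2 (Or.inr (Or.inr (Or.inr (Or.inr (Or.inr (Or.inl ⟨h8, rfl⟩))))))) ?_ (by rfl)]
                  intro y hy
                  rcases (mem_pvHits m y).1 hy with ⟨hc, rfl⟩|⟨hc, rfl⟩|⟨hc, rfl⟩|⟨hc, rfl⟩|⟨hc, rfl⟩|⟨hc, rfl⟩|⟨hc, rfl⟩|hE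
                  · exact absurd hc h1
                  · exact absurd hc h2
                  · exact absurd hc h4
                  · exact absurd hc h6
                  · exact absurd hc h7
                  · norm_num
                  · norm_num
                  · rcases pvExact_cases m y hE with ⟨rfl, hc⟩|⟨rfl, hc⟩
                    · exact absurd hc h3
                    · exact absurd hc h5
                · rw [if_neg h8]
                  by_cases h9 : (PySem.Str.isIn "help" m) = true
                  · rw [if_pos h9, pv_hit m 9 "help" ((mem_pvHits m 9).2 (Or.inr (Or.inr (Or.inr (Or.inr (Or.inr (Or.inr (Or.inl ⟨h9, rfl⟩)))))))) ?_ (by rfl)]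
                    intro y hy
                    rcases (mem_pvHits m y).1 hy with ⟨hc, rfl⟩|⟨hc, rfl⟩|⟨hc, rfl⟩|⟨hc, rfl⟩|⟨hc, rfl⟩|⟨hc, rfl⟩|⟨hc, rfl⟩|hE
                    · exact absurd hc h1
                    · exact absurd hc h2
                    · exact absurd hc h4
                    · exact absurd hc h6
                    · exact absurd hc h7
                    · exact absurd hc h8
                    · norm_num
                    · rcases pvExact_cases m y hE with ⟨rfl, hc⟩|⟨rfl, hc⟩
                      · exact absurd hc h3
                      · exact absurd hc h5
                  · rw [if_neg h9]
                    have hempty : pvHits m = [] := by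
                      rw [List.eq_nil_iff_forall_not_mem]
                      intro y hy
                      rcases (mem_pvHits m y).1 hy with ⟨hc, _⟩|⟨hc, _⟩|⟨hc, _⟩|⟨hc, _⟩|⟨hc, _⟩|⟨hc, _⟩|⟨hc, _⟩|hE
                      · exact h1 hc
                      · exact h2 hc
                      · exact h4 hc
                      · exact h6 hc
                      · exact h7 hc
                      · exact h8 hc
                      · exact h9 hc
                      · rcases pvExact_cases m y hE with ⟨_, hc⟩|⟨_, hc⟩
                        · exact h3 hc
                        · exact h5 hc
                    rw [pv_stage2_empty m hempty]

theorem pv_full (m : String) :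
    (if m == "" || decide (PySem.Str.len m < 2) then "help"
     else if ["hello", "hi", "hey", "good morning", "good afternoon", "good evening"].any (fun k => PySem.Str.isIn k m) then "greeting"
     else if ["thanks", "thank you", "thx"].any (fun k => PySem.Str.isIn k m) then "thanks"
     else if ["ok", "okay", "yes", "very good", "great", "wow", "wow that many", "nice", "no", "nope", "nothing", "nah"].contains m then "conversational"
     else if ["funny", "haha", "lol", "cool"].any (fun k => PySem.Str.isIn k m) then "conversational"
     else if ["everything", "tell me everything", "what happened", "what about"].contains m then "vague"
     else if ["skills", "programming", "languages", "technology", "technical", "experience", "projects", "work", "exp"].any (fun k => PySem.Str.isIn k m) then "technical"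
     else if ["who is", "tell me about", "what does", "about him", "about aung"].any (fun k => PySem.Str.isIn k m) then "identity"
     else if ["hire", "hiring", "contact", "reach", "professional", "work with", "email", "phone"].any (fun k => PySem.Str.isIn k m) then "professional"
     else if PySem.Str.isIn "help" m then "help"
     else if (!(m.toList.any PySem.Chars.isalpha)) || decide ((PySem.Set.ofList (PySem.Str.replace m " " "").toList).length ≤ 3) then "nonsense"
     else "conversational") =
    (if m == "" || decide (PySem.Str.len m < 2) then "help" else pvStage2 m) := by
  by_cases h : (m == "" || decide (PySem.Str.len m < 2)) = true
  · rw [if_pos h, if_pos h]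
  · rw [if_neg h, if_neg h]
    exact pv_body_eq m

-- ===== VERDICT (by name: the statement is the Claim_ definition above) =====
theorem analyze_query_type_py_spec : Claim_equal_analyze_query_type_py := by
  intro message _
  unfold Spec_analyze_query_type_py analyze_query_type_py analyze_query_type_py_alt
  exact pv_full (PySem.Str.strip (PySem.Str.lower message))
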